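-- pv_equiv track=rewrite | github.com/AnthonyP57/gh-actions-testing | bench_compare.py | pick_preferred_ref
-- ===== SOURCE A (Python) =====
-- from typing import Optional, List
--
-- def pick_preferred_ref(refs: List[str]) -> str:
--     """
--     Given a list of refs (like ['origin/main','origin/dev','master','feature/x']),
--     prefer origin/main, origin/master, then first origin/*, then first local.
--     Returns the chosen ref string.
--     """
--     if not refs:
--         return ""
--     # normalize unique order
--     seen = []
--     for r in refs:
--         if r not in seen:
--             seen.append(r)
--     refs = seen
--     # prefer origin/main then origin/master
--     if "origin/main" in refs:
--         return "origin/main"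
--     if "origin/master" in refs:
--         return "origin/master"
--     for r in refs:
--         if r.startswith("origin/"):
--             return r
--     # fallback to first non-HEAD-looking ref
--     return refs[0]
-- ===== SOURCE B (Python) =====
-- def _rank(r):
--     if r == "origin/main":
--         return 0
--     if r == "origin/master":
--         return 1
--     if r.startswith("origin/"):
--         return 2
--     return 3
--
-- def pick_preferred_ref(refs):
--     if not refs:
--         return ""
--     return min(refs, key=_rank)
-- ===== Notes on version B (the rewrite author's own statement) =====
-- stated objective: simpler
-- what changed: Replaced the quadratic dedup pass plus four sequential membership/scan guards by a single rank function (0 main, 1 master, 2 origin/*, 3 other) and one min-by-key pass over the list (first minimum wins), which reproduces the same priority and tie-breaking.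
import Mathlib
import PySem

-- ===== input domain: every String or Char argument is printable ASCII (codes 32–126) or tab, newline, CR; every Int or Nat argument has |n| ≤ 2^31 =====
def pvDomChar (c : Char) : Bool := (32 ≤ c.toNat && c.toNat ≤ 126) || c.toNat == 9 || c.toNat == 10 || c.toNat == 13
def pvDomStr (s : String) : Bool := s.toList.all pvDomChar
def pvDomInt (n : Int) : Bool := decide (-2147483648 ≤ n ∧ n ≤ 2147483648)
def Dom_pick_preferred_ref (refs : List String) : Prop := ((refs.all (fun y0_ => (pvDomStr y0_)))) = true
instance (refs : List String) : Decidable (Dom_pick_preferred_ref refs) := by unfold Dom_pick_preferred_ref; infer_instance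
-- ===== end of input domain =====

-- B replaces A's dedup pass and four sequential guards by one min-by-rank pass (simpler; same O-class in practice on short ref lists).

-- ===== PORT A =====
-- the 'seen' dedup loop of A
def pvSeenLoop (seen : List String) : List String → List String
  | [] => seen
  | r :: rs => if seen.contains r then pvSeenLoop seen rs else pvSeenLoop (seen ++ [r]) rs

def pick_preferred_ref (refs : List String) : String :=
  if refs = [] then ""
  else
    let d := pvSeenLoop [] refs
    if d.contains "origin/main" then "origin/main"
    else if d.contains "origin/master" then "origin/master"
    else
      -- 'for r in refs: if r.startswith("origin/"): return r' = first match
      match d.find? (fun r => PySem.Str.startswith r "origin/") with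
      | some r => r
      | none => d.headD ""   -- refs[0]; d is nonempty since refs is nonempty

-- ===== PORT B =====
def pvRank (r : String) : Int :=
  if r = "origin/main" then 0
  else if r = "origin/master" then 1
  else if PySem.Str.startswith r "origin/" then 2
  else 3

-- Python's min(refs, key=_rank): running minimum keeping the FIRST minimal element
def pvMinLoop (best : String) : List String → String
  | [] => best
  | r :: rs => if pvRank r < pvRank best then pvMinLoop r rs else pvMinLoop best rs

def pick_preferred_ref_alt : List String → String
  | [] => ""
  | r :: rs => pvMinLoop r rs

-- ===== PRECONDITION & SPEC =====
def Spec_pick_preferred_ref (refs : List String) (out : String) : Prop := out = pick_preferred_ref_alt refs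
instance (refs : List String) (out : String) : Decidable (Spec_pick_preferred_ref refs out) := by unfold Spec_pick_preferred_ref; infer_instance

-- ===== CLAIM (what is proved, stated in full; the proofs are below) =====
def Claim_equal_pick_preferred_ref : Prop := ∀ (refs : List String), Dom_pick_preferred_ref refs → Spec_pick_preferred_ref refs (pick_preferred_ref refs)

-- ===== LEMMAS AND PROOFS =====

-- reference function: first element of minimal rank, as a right fold
def pvFmin : List String → String
  | [] => ""
  | [r] => r
  | r :: s :: ss => if pvRank r ≤ pvRank (pvFmin (s :: ss)) then r else pvFmin (s :: ss)

theorem pvFmin_mem : ∀ (l : List String), l ≠ [] → pvFmin l ∈ l := by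
  intro l
  induction l with
  | nil => intro h; exact absurd rfl h
  | cons r rs ih =>
    intro _
    cases rs with
    | nil => simp [pvFmin]
    | cons s ss =>
      simp only [pvFmin]
      split
      · exact List.mem_cons_self
      · exact List.mem_cons_of_mem _ (ih (by simp))

theorem pvMinLoop_eq_fmin : ∀ (rs : List String) (best : String),
    pvMinLoop best rs = pvFmin (best :: rs) := by
  intro rs
  induction rs with
  | nil => intro best; simp [pvMinLoop, pvFmin]
  | cons r rs ih =>
    intro best
    simp only [pvMinLoop, ih]
    cases rs with
    | nil =>
      simp only [pvFmin]
      split_ifs <;> first | rfl | omega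
    | cons s ss =>
      simp only [pvFmin]
      split_ifs <;> first | rfl | omega

theorem pvRank_eq_zero {r : String} (h : pvRank r = 0) : r = "origin/main" := by
  unfold pvRank at h; split_ifs at h with h1 h2 h3 <;> first | exact h1 | omega

theorem pvRank_eq_one {r : String} (h : pvRank r = 1) : r = "origin/main" ∨ r = "origin/master" := by
  unfold pvRank at h; split_ifs at h with h1 h2 h3 <;> first | exact Or.inl h1 | exact Or.inr h2 | omega

theorem pvRank_nonneg (r : String) : 0 ≤ pvRank r := by
  unfold pvRank; split_ifs <;> omega

theorem pvRank_ge_two {r : String} (h1 : r ≠ "origin/main") (h2 : r ≠ "origin/master") :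
    2 ≤ pvRank r := by
  unfold pvRank; split_ifs with a b _ <;> first | exact absurd a h1 | exact absurd b h2 | omega

-- Case 1: main present
theorem pvFmin_main : ∀ (l : List String), "origin/main" ∈ l → pvFmin l = "origin/main" := by
  intro l
  induction l with
  | nil => intro h; simp at h
  | cons r rs ih =>
    intro h
    cases rs with
    | nil => simp at h; simp [pvFmin, h]
    | cons s ss =>
      simp only [pvFmin]
      rcases List.mem_cons.mp h with h | h
      · subst h
        rw [if_pos]
        have h0 : pvRank "origin/main" = 0 := by decide
        rw [h0]; exact pvRank_nonneg _
      · rw [ih h]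
        split_ifs with hc
        · have h0 : pvRank "origin/main" = 0 := by decide
          rw [h0] at hc
          have := pvRank_nonneg r
          exact pvRank_eq_zero (by omega)
        · rfl

-- Case 2: no main, master present
theorem pvFmin_master : ∀ (l : List String), "origin/main" ∉ l → "origin/master" ∈ l →
    pvFmin l = "origin/master" := by
  intro l
  induction l with
  | nil => intro _ h; simp at h
  | cons r rs ih =>
    intro hm h
    cases rs with
    | nil => simp at h; simp [pvFmin, h]
    | cons s ss =>
      have hm1 : r ≠ "origin/main" := fun e => hm (by simp [e])
      have hm2 : "origin/main" ∉ s :: ss := fun e => hm (List.mem_cons_of_mem _ e)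
      have hmem := pvFmin_mem (s :: ss) (by simp)
      have hfm1 : pvFmin (s :: ss) ≠ "origin/main" := fun e => hm2 (e ▸ hmem)
      have h1 : pvRank "origin/master" = 1 := by decide
      simp only [pvFmin]
      rcases List.mem_cons.mp h with h | h
      · subst h
        rw [if_pos]
        rw [h1]
        by_cases hmm : pvFmin (s :: ss) = "origin/master"
        · rw [hmm, h1]
        · have := pvRank_ge_two hfm1 hmm; omega
      · rw [ih hm2 h]
        split_ifs with hc
        · rw [h1] at hc
          have h0 := pvRank_nonneg r
          by_cases hz : pvRank r = 0
          · exact absurd (pvRank_eq_zero hz) hm1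
          · rcases pvRank_eq_one (r := r) (by omega) with h0 | h0
            · exact absurd h0 hm1
            · exact h0
        · rfl

-- Case 3: no main/master, first origin/* element, else head
theorem pvFmin_rest : ∀ (l : List String), "origin/main" ∉ l → "origin/master" ∉ l →
    pvFmin l = (match l.find? (fun r => PySem.Str.startswith r "origin/") with
                | some r => r
                | none => l.headD "") := by
  intro l
  induction l with
  | nil => intro _ _; simp [pvFmin]
  | cons r rs ih =>
    intro hm hM
    have hr1 : r ≠ "origin/main" := fun e => hm (by simp [e])
    have hr2 : r ≠ "origin/master" := fun e => hM (by simp [e])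
    have hm' : "origin/main" ∉ rs := fun e => hm (List.mem_cons_of_mem _ e)
    have hM' : "origin/master" ∉ rs := fun e => hM (List.mem_cons_of_mem _ e)
    cases rs with
    | nil =>
      simp only [pvFmin, List.find?]
      cases hs : PySem.Str.startswith r "origin/" <;> simp
    | cons s ss =>
      have ihe := ih hm' hM'
      have hmem := pvFmin_mem (s :: ss) (by simp)
      have hfm1 : pvFmin (s :: ss) ≠ "origin/main" := fun e => hm' (e ▸ hmem)
      have hfm2 : pvFmin (s :: ss) ≠ "origin/master" := fun e => hM' (e ▸ hmem)
      have hge : 2 ≤ pvRank (pvFmin (s :: ss)) := pvRank_ge_two hfm1 hfm2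
      simp only [pvFmin]
      rw [List.find?_cons]
      cases hs : PySem.Str.startswith r "origin/" with
      | true =>
        simp only
        rw [if_pos]
        have h2 : pvRank r = 2 := by unfold pvRank; rw [if_neg hr1, if_neg hr2, if_pos hs]
        omega
      | false =>
        simp only
        have hr3 : pvRank r = 3 := by unfold pvRank; rw [if_neg hr1, if_neg hr2, hs]; rfl
        cases hf : List.find? (fun r => PySem.Str.startswith r "origin/") (s :: ss) with
        | some x =>
          rw [hf] at ihe
          simp only at ihe
          have hx : PySem.Str.startswith x "origin/" = true := by
            simpa using List.find?_some hf
          have hx1 : x ≠ "origin/main" := ihe ▸ hfm1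
          have hx2 : x ≠ "origin/master" := ihe ▸ hfm2
          have hrx : pvRank x = 2 := by
            unfold pvRank; rw [if_neg hx1, if_neg hx2, if_pos hx]
          rw [if_neg]
          · exact ihe
          · rw [ihe, hrx, hr3]; omega
        | none =>
          rw [hf] at ihe
          simp only at ihe
          have hns : PySem.Str.startswith (pvFmin (s :: ss)) "origin/" = false := by
            have := List.find?_eq_none.mp hf _ hmem
            simpa using this
          have hrf : pvRank (pvFmin (s :: ss)) = 3 := by
            unfold pvRank; rw [if_neg hfm1, if_neg hfm2, hns]; rfl
          rw [if_pos (by rw [hrf, hr3])]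
          rfl

-- dedup-loop lemmas
theorem pvSeenLoop_mem : ∀ (rs seen : List String) (x : String),
    x ∈ pvSeenLoop seen rs ↔ x ∈ seen ∨ x ∈ rs := by
  intro rs
  induction rs with
  | nil => intro seen x; simp [pvSeenLoop]
  | cons r rs ih =>
    intro seen x
    simp only [pvSeenLoop]
    split_ifs with hc
    · rw [ih]
      have hr : r ∈ seen := by simpa using hc
      simp only [List.mem_cons]
      constructor
      · rintro (h | h)
        · exact Or.inl h
        · exact Or.inr (Or.inr h)
      · rintro (h | h | h)
        · exact Or.inl h
        · exact Or.inl (h ▸ hr)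
        · exact Or.inr h
    · rw [ih]
      simp only [List.mem_append, List.mem_cons, List.not_mem_nil]
      tauto

theorem pvSeenLoop_find? : ∀ (rs seen : List String) (p : String → Bool),
    List.find? p (pvSeenLoop seen rs) = ((List.find? p seen).orElse (fun _ => List.find? p rs)) := by
  intro rs
  induction rs with
  | nil =>
    intro seen p
    simp only [pvSeenLoop, List.find?_nil]
    cases hfs : List.find? p seen <;> simp [Option.orElse]
  | cons r rs ih =>
    intro seen p
    simp only [pvSeenLoop]
    split_ifs with hc
    · rw [ih]
      cases hfs : List.find? p seen with
      | some x => simp [Option.orElse]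
      | none =>
        have hr : r ∈ seen := by simpa using hc
        have hpr : p r = false := by
          have := List.find?_eq_none.mp hfs r hr
          simpa using this
        simp [Option.orElse, hpr]
    · rw [ih, List.find?_append]
      cases hfs : List.find? p seen with
      | some x => simp [Option.orElse]
      | none => cases hpr : p r <;> simp [Option.orElse, hpr]

theorem pvSeenLoop_head : ∀ (rs seen : List String), seen ≠ [] →
    (pvSeenLoop seen rs).headD "" = seen.headD "" := by
  intro rs
  induction rs with
  | nil => intro seen h; simp [pvSeenLoop]
  | cons r rs ih =>
    intro seen h
    simp only [pvSeenLoop]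
    split_ifs
    · exact ih seen h
    · rw [ih (seen ++ [r]) (by simp)]
      cases seen with
      | nil => exact absurd rfl h
      | cons a as => simp

theorem pvSeenLoop_find?_nil (l : List String) (p : String → Bool) :
    List.find? p (pvSeenLoop [] l) = List.find? p l := by
  rw [pvSeenLoop_find?]
  simp [Option.orElse]

theorem pvSeenLoop_mem_nil (l : List String) (x : String) :
    x ∈ pvSeenLoop [] l ↔ x ∈ l := by
  rw [pvSeenLoop_mem]; simp

theorem pvSeenLoop_head_nil (r : String) (rs : List String) :
    (pvSeenLoop [] (r :: rs)).headD "" = r := by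
  have h0 : pvSeenLoop [] (r :: rs) = pvSeenLoop [r] rs := by
    simp [pvSeenLoop]
  rw [h0, pvSeenLoop_head rs [r] (by simp)]
  rfl

-- ===== VERDICT (by name: the statement is the Claim_ definition above) =====
theorem pick_preferred_ref_spec : Claim_equal_pick_preferred_ref := by
  unfold Claim_equal_pick_preferred_ref Spec_pick_preferred_ref
  intro refs _
  cases refs with
  | nil => rfl
  | cons r rs =>
    have halt : pick_preferred_ref_alt (r :: rs) = pvFmin (r :: rs) := pvMinLoop_eq_fmin rs r
    rw [halt]
    unfold pick_preferred_ref
    rw [if_neg (by simp)]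
    simp only
    by_cases hmain : "origin/main" ∈ r :: rs
    · have hc : (pvSeenLoop [] (r :: rs)).contains "origin/main" = true := by
        simpa [List.contains_eq_mem] using (pvSeenLoop_mem_nil (r :: rs) "origin/main").mpr hmain
      rw [if_pos hc, pvFmin_main _ hmain]
    · have hc : ¬ ((pvSeenLoop [] (r :: rs)).contains "origin/main" = true) := by
        intro h
        exact hmain ((pvSeenLoop_mem_nil (r :: rs) "origin/main").mp (by simpa [List.contains_eq_mem] using h))
      rw [if_neg hc]
      by_cases hmas : "origin/master" ∈ r :: rs
      · have hc2 : (pvSeenLoop [] (r :: rs)).contains "origin/master" = true := by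
          simpa [List.contains_eq_mem] using (pvSeenLoop_mem_nil (r :: rs) "origin/master").mpr hmas
        rw [if_pos hc2, pvFmin_master _ hmain hmas]
      · have hc2 : ¬ ((pvSeenLoop [] (r :: rs)).contains "origin/master" = true) := by
          intro h
          exact hmas ((pvSeenLoop_mem_nil (r :: rs) "origin/master").mp (by simpa [List.contains_eq_mem] using h))
        rw [if_neg hc2]
        rw [pvFmin_rest _ hmain hmas]
        rw [pvSeenLoop_find?_nil]
        cases hf : List.find? (fun r => PySem.Str.startswith r "origin/") (r :: rs) with
        | some x => rfl
        | none =>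
          simp only
          rw [pvSeenLoop_head_nil]
          rfl
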